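-- pv_equiv track=rewrite | github.com/eigencode/PycharmProjects_census4fsys | census.py | int_decode
-- ===== SOURCE A (Python) =====
-- B56 = "0123456789ABCDEFGHJKMNPQRSTUVWXYZabcdefghjkmnpqrstuvwxyz"
--
-- def int_decode( string, alphabet=B56 ):  # {{{
--     #
--     # Decode a Base X encoded string into the number
--     #
--     #    Arguments:
--     #    - `string`: The encoded string
--     #    - `alphabet`: The alphabet to use for encoding
--     #
--     base = len( alphabet )
--     strlen = len( string )
--     num = 0
--
--     idx00 = 0
--     for char in string:
--         power = (strlen - (idx00 + 1))
--         num += alphabet.index( char ) * (base ** power)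
--         idx00 += 1
--
--     return num
-- ===== SOURCE B (Python) =====
-- B56 = "0123456789ABCDEFGHJKMNPQRSTUVWXYZabcdefghjkmnpqrstuvwxyz"
--
-- def int_decode(string, alphabet=B56):
--     # Horner's method: one pass over the string with a precomputed
--     # char -> value table (first occurrence wins, like str.index).
--     values = {}
--     for i, c in enumerate(alphabet):
--         values.setdefault(c, i)
--     base = len(alphabet)
--     num = 0
--     for c in string:
--         num = num * base + values[c]
--     return num
-- ===== Notes on version B (the rewrite author's own statement) =====
-- stated objective: faster
-- what changed: Replaces the per-character power computation base**(strlen-i-1) and the repeated alphabet.index linear scan by a single Horner-scheme pass with a precomputed char-to-value dictionary.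
import Mathlib
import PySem

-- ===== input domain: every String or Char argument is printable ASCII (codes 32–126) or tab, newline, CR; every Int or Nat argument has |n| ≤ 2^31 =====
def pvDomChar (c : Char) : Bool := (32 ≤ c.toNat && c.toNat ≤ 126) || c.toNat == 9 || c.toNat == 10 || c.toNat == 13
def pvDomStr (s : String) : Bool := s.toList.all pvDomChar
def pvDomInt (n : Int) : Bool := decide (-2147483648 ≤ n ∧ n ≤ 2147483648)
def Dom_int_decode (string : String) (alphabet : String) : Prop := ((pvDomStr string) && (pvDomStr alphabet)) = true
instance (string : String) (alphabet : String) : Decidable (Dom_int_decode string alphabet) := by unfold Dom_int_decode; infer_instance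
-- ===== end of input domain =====

-- B replaces A's positional sum (a linear alphabet.index scan and a fresh power
-- base**(strlen-i-1) per character) by one Horner pass with a precomputed
-- char→value dictionary.

-- ===== PORT A =====
-- alphabet.index(char) raises ValueError when char is absent; Pre_ excludes that,
-- so the `.getD 0` default is never reached on admitted inputs.
def int_decode (string : String) (alphabet : String) : Int :=
  let base : Int := PySem.Str.len alphabet
  let strlen : Nat := string.toList.length
  (string.toList.foldl
    (fun (st : Int × Nat) char =>
      (st.1 + ((PySem.List.index? alphabet.toList char).getD 0 : Int)
                * base ^ (strlen - (st.2 + 1)),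
       st.2 + 1))
    (0, 0)).1

-- ===== PORT B =====
-- values[c] raises KeyError when c is absent; Pre_ excludes that,
-- so the `.getD 0` default is never reached on admitted inputs.
def int_decode_alt (string : String) (alphabet : String) : Int :=
  let values : PySem.Dict Char Int :=
    (PySem.List.enumerate alphabet.toList 0).foldl
      (fun d p => d.setdefault p.2 p.1) PySem.Dict.empty
  let base : Int := PySem.Str.len alphabet
  string.toList.foldl (fun num c => num * base + values.getD c 0) 0

-- ===== PRECONDITION & SPEC =====
-- A raises ValueError (and B KeyError) when some character of `string` does not
-- occur in `alphabet`; Pre_ excludes exactly those inputs.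
def Pre_int_decode (string : String) (alphabet : String) : Prop :=
  (string.toList.all (fun c => alphabet.toList.contains c)) = true
instance (string : String) (alphabet : String) : Decidable (Pre_int_decode string alphabet) := by
  unfold Pre_int_decode; infer_instance

def pvWitness_int_decode : String × String := ("10", "01")

def Spec_int_decode (string : String) (alphabet : String) (out : Int) : Prop :=
  out = int_decode_alt string alphabet
instance (string : String) (alphabet : String) (out : Int) : Decidable (Spec_int_decode string alphabet out) := by
  unfold Spec_int_decode; infer_instance

-- ===== CLAIM (what is proved, stated in full; the proofs are below) =====
def Claim_equal_int_decode : Prop :=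
  ∀ (string : String) (alphabet : String), Dom_int_decode string alphabet →
    Pre_int_decode string alphabet →
    Spec_int_decode string alphabet (int_decode string alphabet)

-- ===== LEMMAS AND PROOFS =====

-- the lookup B's dict build performs, characterised against list index?
theorem pv_build_get? (l : List Char) :
    ∀ (s : Int) (d : PySem.Dict Char Int) (c : Char),
      ((PySem.List.enumerate l s).foldl (fun d p => d.setdefault p.2 p.1) d).get? c
        = (d.get? c).or ((PySem.List.index? l c).map (fun k => s + (k : Int))) := by
  induction l with
  | nil =>
      intro s d c
      simp [PySem.List.enumerate, PySem.List.index?_eq_idxOf?]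
  | cons a l ih =>
      intro s d c
      rw [PySem.List.enumerate_cons]
      simp only [List.foldl_cons]
      rw [ih]
      by_cases hac : a = c
      · subst hac
        rw [PySem.List.index?_cons_self]
        by_cases hc : d.contains a = true
        · rw [PySem.Dict.setdefault_of_contains d s hc]
          rw [PySem.Dict.contains_eq_isSome_get?] at hc
          obtain ⟨v, hv⟩ := Option.isSome_iff_exists.mp hc
          simp [hv]
        · rw [PySem.Dict.setdefault_of_not_contains d s (by simpa using hc)]
          have hnone : d.get? a = none := by
            rw [PySem.Dict.contains_eq_isSome_get?] at hc
            exact Option.not_isSome_iff_eq_none.mp (by simpa using hc)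
          simp [hnone, PySem.Dict.get?_insert_self]
      · have hset : (d.setdefault a s).get? c = d.get? c := by
          by_cases hc : d.contains a = true
          · rw [PySem.Dict.setdefault_of_contains d s hc]
          · rw [PySem.Dict.setdefault_of_not_contains d s (by simpa using hc)]
            exact PySem.Dict.get?_insert_of_ne d s (Ne.symm hac)
        rw [hset, PySem.List.index?_cons_of_ne l hac]
        cases hidx : PySem.List.index? l c with
        | none => simp
        | some k =>
            have h1 : s + 1 + (k : Int) = s + ((k : Int) + 1) := by ring
            simp [h1]

-- under Pre_, B's dict lookup equals A's alphabet.index value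
theorem pv_lookup_eq (al : List Char) (c : Char) (hc : c ∈ al) :
    (((PySem.List.enumerate al 0).foldl (fun d p => d.setdefault p.2 p.1)
        PySem.Dict.empty).getD c 0)
      = ((PySem.List.index? al c).getD 0 : Int) := by
  rw [PySem.Dict.getD_eq_get?_getD, pv_build_get? al 0 PySem.Dict.empty c]
  obtain ⟨k, hk⟩ := Option.isSome_iff_exists.mp
    ((PySem.List.index?_isSome_iff al c).mpr hc)
  rw [PySem.Dict.get?_empty, Option.none_or, hk]
  simp

-- Horner fold with an arbitrary seed
theorem pv_horner_seed (base : Int) (g : Char → Int) (l : List Char) :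
    ∀ (a : Int),
      l.foldl (fun acc c => acc * base + g c) a
        = a * base ^ l.length + l.foldl (fun acc c => acc * base + g c) 0 := by
  induction l with
  | nil => intro a; simp
  | cons x l ih =>
      intro a
      simp only [List.foldl_cons, List.length_cons]
      rw [ih (a * base + g x), ih (0 * base + g x)]
      ring

-- A's positional loop equals the Horner fold
theorem pv_pos_eq_horner (base : Int) (g : Char → Int) (strlen : Nat) (l : List Char) :
    ∀ (num : Int) (idx : Nat), idx + l.length = strlen →
      (l.foldl
        (fun (st : Int × Nat) c =>
          (st.1 + g c * base ^ (strlen - (st.2 + 1)), st.2 + 1)) (num, idx)).1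
        = num + l.foldl (fun acc c => acc * base + g c) 0 := by
  induction l with
  | nil => intro num idx _; simp
  | cons x l ih =>
      intro num idx h
      simp only [List.foldl_cons]
      rw [ih _ (idx + 1) (by simp at h ⊢; omega)]
      have hpow : strlen - (idx + 1) = l.length := by
        simp at h; omega
      rw [hpow, pv_horner_seed base g l (0 * base + g x)]
      ring

-- ===== VERDICT (by name: the statement is the Claim_ definition above) =====
theorem int_decode_spec : Claim_equal_int_decode := by
  intro string alphabet _hdom hpre
  replace hpre : ∀ c ∈ string.toList, c ∈ alphabet.toList := by
    unfold Pre_int_decode at hpre; simpa using hpre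
  unfold Spec_int_decode int_decode int_decode_alt
  simp only
  rw [pv_pos_eq_horner (PySem.Str.len alphabet)
        (fun c => ((PySem.List.index? alphabet.toList c).getD 0 : Int))
        string.toList.length string.toList 0 0 (by simp), zero_add]
  exact (PySem.List.foldl_congr_mem string.toList _ _ 0
    (fun acc c hc => by rw [pv_lookup_eq alphabet.toList c (hpre c hc)])).symm
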